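-- pv_equiv track=rewrite | github.com/carlsward/weekly-stock-pick | backend/generate_pick.py | stooq_symbol_variants
-- ===== SOURCE A (Python) =====
-- from typing import Any, Dict, List, Optional, Sequence, Tuple
--
-- def stooq_symbol_variants(symbol: str) -> List[str]:
--     normalized = symbol.strip().upper()
--     if not normalized:
--         return []
--
--     bases = [
--         normalized.replace(".", "-"),
--         normalized,
--         normalized.replace(".", ""),
--     ]
--     variants: List[str] = []
--     for base in bases:
--         if not base:
--             continue
--         suffixed = base if base.endswith(".US") else f"{base}.US"
--         if suffixed not in variants:
--             variants.append(suffixed)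
--         if base not in variants:
--             variants.append(base)
--     return variants
-- ===== SOURCE B (Python) =====
-- def _variants(bases):
--     # Recursively build variants back-to-front: compute the variants of the
--     # remaining bases first, then prepend this base's block and drop its
--     # elements from the tail.
--     if not bases:
--         return []
--     base, rest = bases[0], _variants(bases[1:])
--     if not base:
--         return rest
--     block = [base] if base.endswith(".US") else [base + ".US", base]
--     return block + [v for v in rest if v not in block]
--
--
-- def stooq_symbol_variants(symbol):
--     normalized = symbol.strip().upper()
--     if not normalized:
--         return []
--     return _variants([
--         normalized.replace(".", "-"),
--         normalized,
--         normalized.replace(".", ""),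
--     ])
-- ===== Notes on version B (the rewrite author's own statement) =====
-- stated objective: alternative
-- what changed: B replaces A's forward loop that appends each candidate after a membership scan of the growing output with a recursion over the bases that builds the result back-to-front: it computes the variants of the remaining bases first, then prepends the current base's block and filters that block's elements out of the tail.
import Mathlib
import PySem

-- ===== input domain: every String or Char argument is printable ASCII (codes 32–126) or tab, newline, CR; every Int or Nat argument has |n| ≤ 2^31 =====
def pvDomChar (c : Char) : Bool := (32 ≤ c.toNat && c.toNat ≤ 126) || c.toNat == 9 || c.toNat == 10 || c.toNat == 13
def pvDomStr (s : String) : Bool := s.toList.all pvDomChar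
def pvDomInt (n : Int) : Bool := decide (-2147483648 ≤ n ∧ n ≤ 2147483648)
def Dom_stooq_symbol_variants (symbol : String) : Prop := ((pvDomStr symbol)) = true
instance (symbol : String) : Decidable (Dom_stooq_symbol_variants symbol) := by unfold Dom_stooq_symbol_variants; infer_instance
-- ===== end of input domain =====

-- ===== PORT A =====
-- B differs in decomposition: recursion building the output back-to-front (block ++ filtered tail) instead of A's forward loop with membership-checked appends; return value only, no mutation.
def stooq_symbol_variants (symbol : String) : List String :=
  let normalized := PySem.Str.upper (PySem.Str.strip symbol)
  if normalized = "" then []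
  else
    let bases := [PySem.Str.replace normalized "." "-", normalized,
                  PySem.Str.replace normalized "." ""]
    bases.foldl (fun variants base =>
      if base = "" then variants
      else
        let suffixed := if PySem.Str.endswith base ".US" then base else base ++ ".US"
        let variants := if suffixed ∈ variants then variants else variants ++ [suffixed]
        if base ∈ variants then variants else variants ++ [base]) []

-- ===== PORT B =====
-- recursive helper of Source B: variants of the remaining bases first, then this base's block prepended and filtered out of the tail
def pvVariantsRec : List String → List String
  | [] => []
  | b :: bs =>
    let rest := pvVariantsRec bs
    if b = "" then rest
    else
      let block := if PySem.Str.endswith b ".US" then [b] else [b ++ ".US", b]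
      block ++ rest.filter (fun v => v ∉ block)

def stooq_symbol_variants_alt (symbol : String) : List String :=
  let normalized := PySem.Str.upper (PySem.Str.strip symbol)
  if normalized = "" then []
  else
    pvVariantsRec [PySem.Str.replace normalized "." "-", normalized,
                   PySem.Str.replace normalized "." ""]

-- ===== PRECONDITION & SPEC =====
def Spec_stooq_symbol_variants (symbol : String) (out : List String) : Prop := out = stooq_symbol_variants_alt symbol
instance (symbol : String) (out : List String) : Decidable (Spec_stooq_symbol_variants symbol out) := by unfold Spec_stooq_symbol_variants; infer_instance

-- ===== CLAIM (what is proved, stated in full; the proofs are below) =====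
def Claim_equal_stooq_symbol_variants : Prop := ∀ (symbol : String), Dom_stooq_symbol_variants symbol → Spec_stooq_symbol_variants symbol (stooq_symbol_variants symbol)

-- ===== LEMMAS AND PROOFS =====

-- the per-base candidate block A's loop appends from (with its internal duplicate when base already ends in ".US")
def pvCand (base : String) : List String :=
  if base = "" then []
  else [(if PySem.Str.endswith base ".US" then base else base ++ ".US"), base]

-- A's two conditional appends for one base are Set.add over that base's candidate block
lemma pvAbody_eq_addFold (acc : List String) (base : String) :
    (if base = "" then acc
     else
       let suffixed := if PySem.Str.endswith base ".US" then base else base ++ ".US"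
       let variants := if suffixed ∈ acc then acc else acc ++ [suffixed]
       if base ∈ variants then variants else variants ++ [base])
    = (pvCand base).foldl PySem.Set.add acc := by
  by_cases h : base = "" <;>
    simp [pvCand, h, List.foldl, PySem.Set.add_eq_ite]

-- A's whole loop is Set.add folded over the concatenation of the candidate blocks
lemma pvAfold_eq (bs acc : List String) :
    bs.foldl (fun variants base =>
      if base = "" then variants
      else
        let suffixed := if PySem.Str.endswith base ".US" then base else base ++ ".US"
        let variants := if suffixed ∈ variants then variants else variants ++ [suffixed]
        if base ∈ variants then variants else variants ++ [base]) acc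
    = (bs.flatMap pvCand).foldl PySem.Set.add acc := by
  induction bs generalizing acc with
  | nil => rfl
  | cons b bs ih =>
    simp only [List.foldl_cons, List.flatMap_cons, List.foldl_append, ih,
      ← pvAbody_eq_addFold acc b]

-- folding Set.add from seed s appends exactly the fresh elements of the ordered dedup
lemma pv_foldl_add (ys s : List String) :
    ys.foldl PySem.Set.add s = s ++ (PySem.Set.ofList ys).filter (fun v => decide (v ∉ s)) := by
  induction ys generalizing s with
  | nil => simp [PySem.Set.ofList]
  | cons y ys ih =>
    have hof : PySem.Set.ofList (y :: ys)
        = [y] ++ (PySem.Set.ofList ys).filter (fun v => decide (v ∉ ([y] : List String))) := by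
      rw [PySem.Set.ofList_eq_foldl, List.foldl_cons]
      have : PySem.Set.add ([] : List String) y = [y] := by
        simp [PySem.Set.add]
      rw [this, ih]
    rw [List.foldl_cons, ih, hof]
    by_cases hy : y ∈ s
    · have hadd : PySem.Set.add s y = s := by simp [PySem.Set.add, hy]
      rw [hadd]
      simp only [List.filter_append, List.filter_filter]
      congr 1
      · have : List.filter (fun v => decide (v ∉ s)) [y] = [] := by simp [hy]
        rw [this, List.nil_append]
        apply List.filter_congr
        intro v _
        by_cases hvs : v ∈ s
        · simp [hvs]
        · have hvy : v ≠ y := fun h => hvs (h ▸ hy)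
          simp [hvs, hvy]
    · have hadd : PySem.Set.add s y = s ++ [y] := by simp [PySem.Set.add, hy]
      rw [hadd]
      simp only [List.filter_append, List.filter_filter, List.append_assoc]
      congr 1
      have : List.filter (fun v => decide (v ∉ s)) [y] = [y] := by simp [hy]
      rw [this]
      simp only [List.cons_append, List.nil_append]
      congr 1
      apply List.filter_congr
      intro v _
      by_cases hvs : v ∈ s <;> by_cases hvy : v = y <;> simp [hvs, hvy, List.mem_append]
lemma pv_append_ne (b : String) : b ++ ".US" ≠ b := by
  intro h
  have := congrArg String.length h
  simp [String.length_append] at this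

-- ordered dedup of the concatenated candidate blocks is exactly B's back-to-front recursion
lemma pvOfList_flatMap (bs : List String) :
    PySem.Set.ofList (bs.flatMap pvCand) = pvVariantsRec bs := by
  induction bs with
  | nil => rfl
  | cons b bs ih =>
    rw [List.flatMap_cons, PySem.Set.ofList_eq_foldl, List.foldl_append,
      ← PySem.Set.ofList_eq_foldl, pv_foldl_add, ih]
    show PySem.Set.ofList (pvCand b) ++ _ = _
    by_cases hb : b = ""
    · simp [pvCand, hb, pvVariantsRec, PySem.Set.ofList]
    · by_cases hus : PySem.Str.endswith b ".US"
      · have hus' : PySem.Chars.endswith b.toList ['.', 'U', 'S'] = true := by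
          simpa [PySem.Str.endswith] using hus
        have hof : PySem.Set.ofList (pvCand b) = [b] := by
          simp [pvCand, hb, hus', PySem.Set.ofList]
        rw [hof]
        simp [pvVariantsRec, hb, hus']
      · have hus' : ¬ PySem.Chars.endswith b.toList ['.', 'U', 'S'] = true := by
          simpa [PySem.Str.endswith] using hus
        have hof : PySem.Set.ofList (pvCand b) = [b ++ ".US", b] := by
          simp [pvCand, hb, hus', PySem.Set.ofList, PySem.Set.add,
            (pv_append_ne b).symm]
        rw [hof]
        simp [pvVariantsRec, hb, hus']

-- ===== VERDICT (by name: the statement is the Claim_ definition above) =====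
theorem stooq_symbol_variants_spec : Claim_equal_stooq_symbol_variants := by
  intro symbol _
  unfold Spec_stooq_symbol_variants stooq_symbol_variants stooq_symbol_variants_alt
  by_cases h : PySem.Str.upper (PySem.Str.strip symbol) = ""
  · simp [h]
  · simp only [h, if_false]
    rw [pvAfold_eq, ← PySem.Set.ofList_eq_foldl, pvOfList_flatMap]
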